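-- pv_equiv track=rewrite | github.com/Lilongue/utilites | booklibrary/literation.py | re_transliterate
-- ===== SOURCE A (Python) =====
-- def re_transliterate(text):
--     """
--     Transliterates a string from one language to another.
--
--     Args:
--         text (str): The string to re-transliterate.
--
--     Returns:
--         str: The transliterated string.
--     """
--
--     # Create a dictionary of transliteration rules.
--     transliteration_rules = {
--         'a': 'а',
--         'b': 'б',
--         'v': 'в',
--         'g': 'г',
--         'd': 'д',
--         'e': 'е',
--         'z': 'з',
--         'i': 'и',
--         'j': 'й',
--         'k': 'к',
--         'l': 'л',
--         'm': 'м',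
--         'n': 'н',
--         'o': 'о',
--         'p': 'п',
--         'r': 'р',
--         's': 'с',
--         't': 'т',
--         'u': 'у',
--         'f': 'ф',
--         'h': 'х',
--         'y': 'ы',
--         '\'': 'ь',
--         'zh': 'ж',
--         'shch': 'щ',
--         'ch': 'ч',
--         'sh': 'ш',
--         'iu': 'ю',
--         'yu': 'ю',
--         'ya': 'я',
--         'ja': 'я',
--     }
--
--     # Transliterate the string.
--     transliterated_text = ''
--     tmp_text = text
--     while len(tmp_text) > 0:
--         literal1, literal2, literal4 = get_literals_set(tmp_text)
--         if literal4 in transliteration_rules: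
--             tmp_text = tmp_text[4:]
--             transliterated_text += transliteration_rules.get(literal4)
--             continue
--         if literal2 in transliteration_rules:
--             tmp_text = tmp_text[2:]
--             transliterated_text += transliteration_rules.get(literal2)
--             continue
--         tmp_text = tmp_text[1:]
--         transliterated_text += transliteration_rules.get(literal1, literal1)
--
--     # Return the transliterated string.
--     return transliterated_text
--
-- def get_literals_set(text):
--     return get_next_literal(text, 1), get_next_literal(text, 2), get_next_literal(text, 4)
--
-- def get_next_literal(text, base=1):
--     if len(text) >= base:
--         return text[:base].lower()
--     return ''
-- ===== SOURCE B (Python) =====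
-- # Single forward scan over a pre-lowercased string with an index pointer:
-- # longest-match against an ordered prefix table (4/2-char rules), pieces joined once.
-- MULTI_RULES = [
--     ('shch', 'щ'), ('zh', 'ж'), ('ch', 'ч'), ('sh', 'ш'),
--     ('iu', 'ю'), ('yu', 'ю'), ('ya', 'я'), ('ja', 'я'),
-- ]
--
-- ONE_RULES = {
--     'a': 'а', 'b': 'б', 'v': 'в', 'g': 'г', 'd': 'д', 'e': 'е',
--     'z': 'з', 'i': 'и', 'j': 'й', 'k': 'к', 'l': 'л', 'm': 'м',
--     'n': 'н', 'o': 'о', 'p': 'п', 'r': 'р', 's': 'с', 't': 'т',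
--     'u': 'у', 'f': 'ф', 'h': 'х', 'y': 'ы', '\'': 'ь',
-- }
--
-- def re_transliterate(text):
--     low = text.lower()
--     n = len(low)
--     pieces = []
--     i = 0
--     while i < n:
--         for pat, rep in MULTI_RULES:
--             if low.startswith(pat, i):
--                 pieces.append(rep)
--                 i += len(pat)
--                 break
--         else:
--             c = low[i]
--             pieces.append(ONE_RULES.get(c, c))
--             i += 1
--     return ''.join(pieces)
-- ===== Notes on version B (the rewrite author's own statement) =====
-- stated objective: faster
-- what changed: Replaces the quadratic while-loop that repeatedly slices the remaining string, re-lowercases prefixes and concatenates onto an output string with a single forward index scan over a once-lowercased string, matching an ordered multi-char prefix table via startswith and joining collected pieces once.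
import Mathlib
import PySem

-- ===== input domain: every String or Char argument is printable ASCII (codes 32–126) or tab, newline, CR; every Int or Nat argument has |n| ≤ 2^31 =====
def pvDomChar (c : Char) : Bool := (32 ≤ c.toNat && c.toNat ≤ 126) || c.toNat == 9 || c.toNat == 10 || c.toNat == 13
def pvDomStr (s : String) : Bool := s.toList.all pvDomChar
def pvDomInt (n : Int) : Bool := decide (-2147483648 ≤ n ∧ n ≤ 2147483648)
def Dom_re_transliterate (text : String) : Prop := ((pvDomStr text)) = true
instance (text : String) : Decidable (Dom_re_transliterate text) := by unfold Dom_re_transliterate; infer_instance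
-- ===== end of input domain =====

-- B replaces A's quadratic slice-and-concat loop by a single index scan over a
-- once-lowercased string with an ordered prefix table and a final join (objective: faster).

-- ===== PORT A =====

-- A's transliteration_rules dict literal (insertion order, distinct keys)
def translitRules : PySem.Dict (List Char) (List Char) := PySem.Dict.mk [
  (['a'], ['а']), (['b'], ['б']), (['v'], ['в']), (['g'], ['г']), (['d'], ['д']),
  (['e'], ['е']), (['z'], ['з']), (['i'], ['и']), (['j'], ['й']), (['k'], ['к']),
  (['l'], ['л']), (['m'], ['м']), (['n'], ['н']), (['o'], ['о']), (['p'], ['п']),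
  (['r'], ['р']), (['s'], ['с']), (['t'], ['т']), (['u'], ['у']), (['f'], ['ф']),
  (['h'], ['х']), (['y'], ['ы']), (['\''], ['ь']),
  (['z','h'], ['ж']), (['s','h','c','h'], ['щ']), (['c','h'], ['ч']), (['s','h'], ['ш']),
  (['i','u'], ['ю']), (['y','u'], ['ю']), (['y','a'], ['я']), (['j','a'], ['я'])]

-- get_next_literal: text[:base].lower() when len(text) >= base else '' (text[:base] = take base for base ≥ 0)
def getNextLiteral (text : List Char) (base : Nat) : List Char :=
  if base ≤ text.length then PySem.Chars.lower (text.take base) else []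

-- the while-loop of A: tmp_text is consumed from the front, output accumulated by +=
def aLoop (tmp : List Char) (acc : List Char) : List Char :=
  if 0 < tmp.length then
    -- get_literals_set(tmp_text)
    let literal1 := getNextLiteral tmp 1
    let literal2 := getNextLiteral tmp 2
    let literal4 := getNextLiteral tmp 4
    match PySem.Dict.get? translitRules literal4 with
    | some v => aLoop (tmp.drop 4) (acc ++ v)        -- tmp_text[4:]
    | none =>
      match PySem.Dict.get? translitRules literal2 with
      | some v => aLoop (tmp.drop 2) (acc ++ v)      -- tmp_text[2:]
      | none => aLoop (tmp.drop 1) (acc ++ PySem.Dict.getD translitRules literal1 literal1)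
  else acc
termination_by tmp.length


def re_transliterate (text : String) : String :=
  String.ofList (aLoop text.toList [])

-- ===== PORT B =====

-- B's MULTI_RULES list (ordered: longest first)
def multiRules : List (List Char × List Char) :=
  [(['s','h','c','h'], ['щ']), (['z','h'], ['ж']), (['c','h'], ['ч']), (['s','h'], ['ш']),
   (['i','u'], ['ю']), (['y','u'], ['ю']), (['y','a'], ['я']), (['j','a'], ['я'])]

-- B's ONE_RULES dict
def oneRules : PySem.Dict (List Char) (List Char) := PySem.Dict.mk [
  (['a'], ['а']), (['b'], ['б']), (['v'], ['в']), (['g'], ['г']), (['d'], ['д']),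
  (['e'], ['е']), (['z'], ['з']), (['i'], ['и']), (['j'], ['й']), (['k'], ['к']),
  (['l'], ['л']), (['m'], ['м']), (['n'], ['н']), (['o'], ['о']), (['p'], ['п']),
  (['r'], ['р']), (['s'], ['с']), (['t'], ['т']), (['u'], ['у']), (['f'], ['ф']),
  (['h'], ['х']), (['y'], ['ы']), (['\''], ['ь'])]

-- termination helper for bLoop (cited in decreasing_by)
theorem multiKey_pos : ∀ p ∈ multiRules, 0 < p.1.length := by decide

-- the while-loop of B: index pointer i, pieces accumulated in a list
-- (the for/break over MULTI_RULES is List.find?; low.startswith(pat, i) = startswith on low[i:])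
def bLoop (low : List Char) (i : Nat) (pieces : List (List Char)) : List (List Char) :=
  if h : i < low.length then
    match hf : multiRules.find? (fun p => PySem.Chars.startswith (low.drop i) p.1) with
    | some p => bLoop low (i + p.1.length) (pieces ++ [p.2])
    | none =>
      let c := low[i]
      bLoop low (i + 1) (pieces ++ [PySem.Dict.getD oneRules [c] [c]])
  else pieces
termination_by low.length - i
decreasing_by
  · have hp := multiKey_pos _ (List.mem_of_find?_eq_some hf); omega
  · omega

def re_transliterate_alt (text : String) : String :=
  String.ofList (PySem.Chars.join [] (bLoop (PySem.Chars.lower text.toList) 0 []))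

-- ===== PRECONDITION & SPEC =====
def Spec_re_transliterate (text : String) (out : String) : Prop := out = re_transliterate_alt text
instance (text : String) (out : String) : Decidable (Spec_re_transliterate text out) := by unfold Spec_re_transliterate; infer_instance

-- ===== CLAIM (what is proved, stated in full; the proofs are below) =====
def Claim_equal_re_transliterate : Prop := ∀ (text : String), Dom_re_transliterate text → Spec_re_transliterate text (re_transliterate text)

-- ===== LEMMAS AND PROOFS =====

theorem char_le_toNat (a b : Char) : a ≤ b ↔ a.toNat ≤ b.toNat := by
  rw [Char.le_def, UInt32.le_iff_toNat_le]; rfl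

theorem lowerChar_idem (c : Char) : PySem.Chars.lowerChar (PySem.Chars.lowerChar c) = PySem.Chars.lowerChar c := by
  unfold PySem.Chars.lowerChar PySem.Chars.isupper
  by_cases h : 'A' ≤ c ∧ c ≤ 'Z'
  · have hA : 65 ≤ c.toNat := (char_le_toNat _ _).1 h.1
    have hZ : c.toNat ≤ 90 := (char_le_toNat _ _).1 h.2
    have hv : (c.toNat + 32).isValidChar := by left; omega
    have hd : (Char.ofNat (c.toNat + 32)).toNat = c.toNat + 32 := by
      rw [Char.toNat_ofNat]; simp [hv]
    have hnot : ¬ (Char.ofNat (c.toNat + 32)) ≤ 'Z' := by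
      rw [char_le_toNat, hd]; show ¬ _ ≤ 90; omega
    simp [h.1, h.2, hnot]
  · simp [h]

theorem join_nil_flatten (ps : List (List Char)) : PySem.Chars.join [] ps = ps.flatten := by
  induction ps with
  | nil => rfl
  | cons h t ih => cases t <;> simp_all [PySem.Chars.join, List.intercalate]

theorem aLoop_acc : ∀ n (t : List Char), t.length ≤ n → ∀ acc, aLoop t acc = acc ++ aLoop t [] := by
  intro n
  induction n with
  | zero =>
    intro t h acc
    have ht : t = [] := by cases t <;> simp_all
    subst ht; rw [aLoop, aLoop]; simp
  | succ n ih =>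
    intro t h acc
    rw [aLoop, aLoop]
    by_cases h0 : 0 < t.length
    · simp only [if_pos h0]
      cases hf4 : PySem.Dict.get? translitRules (getNextLiteral t 4) with
      | some v =>
        dsimp only
        rw [ih (t.drop 4) (by simp; omega) (acc ++ v), ih (t.drop 4) (by simp; omega) ([] ++ v)]
        simp
      | none =>
        cases hf2 : PySem.Dict.get? translitRules (getNextLiteral t 2) with
        | some v =>
          dsimp only
          rw [ih (t.drop 2) (by simp; omega) (acc ++ v), ih (t.drop 2) (by simp; omega) ([] ++ v)]
          simp
        | none =>
          dsimp only
          rw [ih (t.drop 1) (by simp; omega) _, ih (t.drop 1) (by simp; omega) ([] ++ _)]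
          simp
    · simp [h0]

-- dict lookups on symbolic short keys
theorem getA4 (a b c d : Char) : PySem.Dict.get? translitRules [a,b,c,d] =
    if a = 's' ∧ b = 'h' ∧ c = 'c' ∧ d = 'h' then some ['щ'] else none := by
  simp [translitRules, PySem.Dict.get?, List.find?]
  split_ifs with h
  · simp_all
  · cases heq : ('s' == a && ('h' == b && ('c' == c && 'h' == d)))
    · rfl
    · simp at heq; obtain ⟨h1, h2, h3, h4⟩ := heq
      exact absurd ⟨h1.symm, h2.symm, h3.symm, h4.symm⟩ h

theorem getA2 (a b : Char) : PySem.Dict.get? translitRules [a,b] =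
    if a = 'z' ∧ b = 'h' then some ['ж']
    else if a = 'c' ∧ b = 'h' then some ['ч']
    else if a = 's' ∧ b = 'h' then some ['ш']
    else if a = 'i' ∧ b = 'u' then some ['ю']
    else if a = 'y' ∧ b = 'u' then some ['ю']
    else if a = 'y' ∧ b = 'a' then some ['я']
    else if a = 'j' ∧ b = 'a' then some ['я']
    else none := by
  by_cases h1 : a = 'z' ∧ b = 'h'
  · obtain ⟨rfl, rfl⟩ := h1; decide
  by_cases h2 : a = 'c' ∧ b = 'h'
  · obtain ⟨rfl, rfl⟩ := h2; decide
  by_cases h3 : a = 's' ∧ b = 'h'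
  · obtain ⟨rfl, rfl⟩ := h3; decide
  by_cases h4 : a = 'i' ∧ b = 'u'
  · obtain ⟨rfl, rfl⟩ := h4; decide
  by_cases h5 : a = 'y' ∧ b = 'u'
  · obtain ⟨rfl, rfl⟩ := h5; decide
  by_cases h6 : a = 'y' ∧ b = 'a'
  · obtain ⟨rfl, rfl⟩ := h6; decide
  by_cases h7 : a = 'j' ∧ b = 'a'
  · obtain ⟨rfl, rfl⟩ := h7; decide
  simp only [if_neg h1, if_neg h2, if_neg h3, if_neg h4, if_neg h5, if_neg h6, if_neg h7]
  simp only [PySem.Dict.get?]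
  rw [List.find?_eq_none.mpr]; · rfl
  intro x hx; fin_cases hx <;> simp <;> intro p q <;> simp_all [eq_comm]

def multiTail : List (List Char × List Char) :=
  [(['z','h'], ['ж']), (['s','h','c','h'], ['щ']), (['c','h'], ['ч']), (['s','h'], ['ш']),
   (['i','u'], ['ю']), (['y','u'], ['ю']), (['y','a'], ['я']), (['j','a'], ['я'])]

theorem items_split : translitRules.items = oneRules.items ++ multiTail := by decide

theorem getA1 (a : Char) : PySem.Dict.get? translitRules [a] = PySem.Dict.get? oneRules [a] := by
  simp only [PySem.Dict.get?, items_split, List.find?_append]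
  have h : multiTail.find? (fun p => p.1 == [a]) = none := by
    rw [List.find?_eq_none]; intro x hx; fin_cases hx <;> simp
  rw [h, Option.or_none]

theorem aLoop_nil (acc : List Char) : aLoop [] acc = acc := by
  rw [aLoop]; simp

theorem aLoop_acc' (t acc : List Char) : aLoop t acc = acc ++ aLoop t [] :=
  aLoop_acc t.length t le_rfl acc

theorem getA0 : PySem.Dict.get? translitRules [] = none := by decide

theorem getD1 (a : Char) :
    PySem.Dict.getD translitRules [a] [a] = PySem.Dict.getD oneRules [a] [a] := by
  simp [PySem.Dict.getD, getA1]

theorem sw_shch (a b c d : Char) (t : List Char) :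
    PySem.Chars.startswith (a::b::c::d::t) ['s','h','c','h'] =
    decide (a = 's' ∧ b = 'h' ∧ c = 'c' ∧ d = 'h') := by
  by_cases h : a = 's' ∧ b = 'h' ∧ c = 'c' ∧ d = 'h'
  · obtain ⟨rfl, rfl, rfl, rfl⟩ := h
    simp [PySem.Chars.startswith, List.isPrefixOf]
  · rw [decide_eq_false h]
    cases heq : PySem.Chars.startswith (a::b::c::d::t) ['s','h','c','h']
    · rfl
    · simp [PySem.Chars.startswith, List.isPrefixOf] at heq
      exact absurd ⟨heq.1.symm, heq.2.1.symm, heq.2.2.1.symm, heq.2.2.2.symm⟩ h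

theorem bfind1 (a : Char) :
    multiRules.find? (fun p => PySem.Chars.startswith [a] p.1) = none := by
  simp [multiRules, List.find?, PySem.Chars.startswith, List.isPrefixOf]

theorem sw2 (a b x y : Char) (t : List Char) :
    PySem.Chars.startswith (a::b::t) [x,y] = decide (a = x ∧ b = y) := by
  by_cases h : a = x ∧ b = y
  · obtain ⟨rfl, rfl⟩ := h; simp [PySem.Chars.startswith, List.isPrefixOf]
  · rw [decide_eq_false h]
    cases heq : PySem.Chars.startswith (a::b::t) [x,y]
    · rfl
    · simp [PySem.Chars.startswith, List.isPrefixOf] at heq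
      exact absurd ⟨heq.1.symm, heq.2.symm⟩ h

theorem twochain (a b : Char) (u : List Char)
    (hns : PySem.Chars.startswith (a::b::u) ['s','h','c','h'] = false) :
    multiRules.find? (fun p => PySem.Chars.startswith (a::b::u) p.1) =
    if a = 'z' ∧ b = 'h' then some (['z','h'], ['ж'])
    else if a = 'c' ∧ b = 'h' then some (['c','h'], ['ч'])
    else if a = 's' ∧ b = 'h' then some (['s','h'], ['ш'])
    else if a = 'i' ∧ b = 'u' then some (['i','u'], ['ю'])
    else if a = 'y' ∧ b = 'u' then some (['y','u'], ['ю'])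
    else if a = 'y' ∧ b = 'a' then some (['y','a'], ['я'])
    else if a = 'j' ∧ b = 'a' then some (['j','a'], ['я'])
    else none := by
  simp only [multiRules, List.find?, hns, sw2]
  by_cases h1 : a = 'z' ∧ b = 'h'
  · simp [h1]
  by_cases h2 : a = 'c' ∧ b = 'h'
  · simp [h2]
  by_cases h3 : a = 's' ∧ b = 'h'
  · simp [h3]
  by_cases h4 : a = 'i' ∧ b = 'u'
  · simp [h4]
  by_cases h5 : a = 'y' ∧ b = 'u'
  · simp [h5]
  by_cases h6 : a = 'y' ∧ b = 'a'
  · simp [h6]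
  by_cases h7 : a = 'j' ∧ b = 'a'
  · simp [h7]
  simp [h1, h2, h3, h4, h5, h6, h7]

theorem main_lemma : ∀ n (low : List Char), (∀ c ∈ low, PySem.Chars.lowerChar c = c) →
    ∀ i pieces, low.length - i ≤ n →
    (bLoop low i pieces).flatten = pieces.flatten ++ aLoop (low.drop i) [] := by
  intro n
  induction n with
  | zero =>
    intro low hfix i pieces hn
    have hi : ¬ i < low.length := by omega
    rw [bLoop]; rw [dif_neg hi]
    rw [List.drop_eq_nil_iff.mpr (by omega), aLoop_nil]; simp
  | succ n ih =>
    intro low hfix i pieces hn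
    by_cases hi : i < low.length
    case neg =>
      rw [bLoop]; rw [dif_neg hi]
      rw [List.drop_eq_nil_iff.mpr (by omega), aLoop_nil]; simp
    case pos =>
    have hsub : ∀ c ∈ low.drop i, PySem.Chars.lowerChar c = c :=
      fun c hc => hfix c (List.drop_subset _ _ hc)
    have hlen : (low.drop i).length = low.length - i := List.length_drop
    rw [bLoop]; rw [dif_pos hi]
    rcases hd : low.drop i with _ | ⟨a, u⟩
    · rw [hd] at hlen; simp at hlen; omega
    have ha := hsub a (by rw [hd]; simp)
    have hgete : low[i] = a := by
      refine (List.getElem_eq_iff hi).mpr ?_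
      rw [show low[i]? = (List.drop i low)[0]? from by simp [List.getElem?_drop], hd]; rfl
    have hlow : low.length - i = u.length + 1 := by rw [← hlen, hd]; simp
    rcases u with _ | ⟨b, u⟩
    · -- remainder is the single character [a]
      split
      next p heq => rw [bfind1] at heq; exact absurd heq (by simp)
      next heq =>
        rw [ih low hfix (i+1) _ (by omega)]
        have hdrop : List.drop (i+1) low = [] := by
          rw [← List.drop_drop, hd]; rfl
        rw [hdrop, aLoop_nil]
        rw [aLoop]
        rw [if_pos (by simp)]
        dsimp only
        simp only [getNextLiteral]
        norm_num
        simp [PySem.Chars.lower, ha, getA0, getD1, hgete, aLoop_nil]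
    · -- remainder is a :: b :: u
      have hb := hsub b (by rw [hd]; simp)
      have hl2 : getNextLiteral (a::b::u) 2 = [a,b] := by
        simp [getNextLiteral, PySem.Chars.lower, ha, hb]
      have hl1 : getNextLiteral (a::b::u) 1 = [a] := by
        simp [getNextLiteral, PySem.Chars.lower, ha]
      cases hsw : PySem.Chars.startswith (a::b::u) ['s','h','c','h'] with
      | true =>
        obtain ⟨t, ht⟩ := (PySem.Chars.startswith_iff _ _).mp hsw
        obtain ⟨rfl, rfl, rfl⟩ : a = 's' ∧ b = 'h' ∧ u = 'c'::'h'::t := by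
          simpa [eq_comm, and_assoc] using ht.symm
        split
        next p heq =>
          rw [show List.find? (fun p => PySem.Chars.startswith ('s'::'h'::'c'::'h'::t) p.1) multiRules
              = some (['s','h','c','h'], ['щ']) from by
            simp [multiRules, PySem.Chars.startswith, List.isPrefixOf]] at heq
          injection heq with hp
          subst hp
          dsimp only
          rw [show (['s','h','c','h'] : List Char).length = 4 from rfl]
          rw [ih low hfix (i+4) _ (by omega)]
          rw [show List.drop (i+4) low = t from by rw [← List.drop_drop, hd]; rfl]
          conv_rhs => rw [aLoop]
          rw [if_pos (by simp)]
          dsimp only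
          rw [show getNextLiteral ('s'::'h'::'c'::'h'::t) 4 = ['s','h','c','h'] from by
            simp [getNextLiteral]; decide]
          rw [getA4]
          rw [if_pos ⟨rfl, rfl, rfl, rfl⟩]
          dsimp only
          rw [aLoop_acc' (List.drop 4 ('s'::'h'::'c'::'h'::t))]
          simp
        next heq =>
          rw [List.find?_eq_none] at heq
          have hmem : (['s','h','c','h'], ['щ']) ∈ multiRules := by simp [multiRules]
          have := heq _ hmem
          simp [PySem.Chars.startswith, List.isPrefixOf] at this
      | false =>
        have hl4 : PySem.Dict.get? translitRules (getNextLiteral (a::b::u) 4) = none := by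
          rcases u with _ | ⟨c, u⟩
          · simp [getNextLiteral, getA0]
          rcases u with _ | ⟨d, u⟩
          · simp [getNextLiteral, getA0]
          · have hc := hsub c (by rw [hd]; simp)
            have hd' := hsub d (by rw [hd]; simp)
            rw [sw_shch] at hsw
            simp only [decide_eq_false_iff_not] at hsw
            simp [getNextLiteral, PySem.Chars.lower, ha, hb, hc, hd', getA4, hsw]
        rw [aLoop]
        rw [if_pos (by simp)]
        dsimp only
        rw [hl4, hl2, hl1, getA2]
        split
        next p heq =>
          rw [twochain a b u hsw] at heq
          split_ifs at heq with h1 h2 h3 h4 h5 h6 h7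
          · injection heq with hp
            subst hp
            dsimp only
            rw [show ((['z','h'] : List Char)).length = 2 from rfl]
            rw [ih low hfix (i+2) _ (by omega)]
            rw [show List.drop (i+2) low = u from by rw [← List.drop_drop, hd]; rfl]
            simp only [if_pos h1]
            try dsimp only
            rw [aLoop_acc' (List.drop 2 (a::b::u))]
            simp
          · injection heq with hp
            subst hp
            dsimp only
            rw [show ((['c','h'] : List Char)).length = 2 from rfl]
            rw [ih low hfix (i+2) _ (by omega)]
            rw [show List.drop (i+2) low = u from by rw [← List.drop_drop, hd]; rfl]
            simp only [if_neg h1, if_pos h2]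
            try dsimp only
            rw [aLoop_acc' (List.drop 2 (a::b::u))]
            simp
          · injection heq with hp
            subst hp
            dsimp only
            rw [show ((['s','h'] : List Char)).length = 2 from rfl]
            rw [ih low hfix (i+2) _ (by omega)]
            rw [show List.drop (i+2) low = u from by rw [← List.drop_drop, hd]; rfl]
            simp only [if_neg h1, if_neg h2, if_pos h3]
            try dsimp only
            rw [aLoop_acc' (List.drop 2 (a::b::u))]
            simp
          · injection heq with hp
            subst hp
            dsimp only
            rw [show ((['i','u'] : List Char)).length = 2 from rfl]
            rw [ih low hfix (i+2) _ (by omega)]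
            rw [show List.drop (i+2) low = u from by rw [← List.drop_drop, hd]; rfl]
            simp only [if_neg h1, if_neg h2, if_neg h3, if_pos h4]
            try dsimp only
            rw [aLoop_acc' (List.drop 2 (a::b::u))]
            simp
          · injection heq with hp
            subst hp
            dsimp only
            rw [show ((['y','u'] : List Char)).length = 2 from rfl]
            rw [ih low hfix (i+2) _ (by omega)]
            rw [show List.drop (i+2) low = u from by rw [← List.drop_drop, hd]; rfl]
            simp only [if_neg h1, if_neg h2, if_neg h3, if_neg h4, if_pos h5]
            try dsimp only
            rw [aLoop_acc' (List.drop 2 (a::b::u))]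
            simp
          · injection heq with hp
            subst hp
            dsimp only
            rw [show ((['y','a'] : List Char)).length = 2 from rfl]
            rw [ih low hfix (i+2) _ (by omega)]
            rw [show List.drop (i+2) low = u from by rw [← List.drop_drop, hd]; rfl]
            simp only [if_neg h1, if_neg h2, if_neg h3, if_neg h4, if_neg h5, if_pos h6]
            try dsimp only
            rw [aLoop_acc' (List.drop 2 (a::b::u))]
            simp
          · injection heq with hp
            subst hp
            dsimp only
            rw [show ((['j','a'] : List Char)).length = 2 from rfl]
            rw [ih low hfix (i+2) _ (by omega)]
            rw [show List.drop (i+2) low = u from by rw [← List.drop_drop, hd]; rfl]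
            simp only [if_neg h1, if_neg h2, if_neg h3, if_neg h4, if_neg h5, if_neg h6, if_pos h7]
            try dsimp only
            rw [aLoop_acc' (List.drop 2 (a::b::u))]
            simp
        next heq =>
          rw [twochain a b u hsw] at heq
          split_ifs at heq with h1 h2 h3 h4 h5 h6 h7; try exact Option.noConfusion heq
          simp only [if_neg h1, if_neg h2, if_neg h3, if_neg h4, if_neg h5, if_neg h6, if_neg h7]
          try dsimp only
          rw [ih low hfix (i+1) _ (by omega)]
          rw [show List.drop (i+1) low = b :: u from by rw [← List.drop_drop, hd]; rfl]
          rw [aLoop_acc' (List.drop 1 (a::b::u))]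
          simp [getD1, hgete]


theorem aLoop_lower : ∀ n (s : List Char), s.length ≤ n → ∀ acc,
    aLoop s acc = aLoop (PySem.Chars.lower s) acc := by
  intro n
  induction n with
  | zero =>
    intro s h acc
    have : s = [] := by cases s <;> simp_all
    subst this; rfl
  | succ n ih =>
    intro s h acc
    have hg : ∀ k, getNextLiteral (PySem.Chars.lower s) k = getNextLiteral s k := by
      intro k
      unfold getNextLiteral
      have hcomp : PySem.Chars.lowerChar ∘ PySem.Chars.lowerChar = PySem.Chars.lowerChar :=
        funext lowerChar_idem
      simp [PySem.Chars.lower, ← List.map_take, List.map_map, hcomp]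
    have hdr : ∀ k, (PySem.Chars.lower s).drop k = PySem.Chars.lower (s.drop k) := by
      intro k; simp [PySem.Chars.lower, List.map_drop]
    rw [aLoop, aLoop]
    by_cases h0 : 0 < s.length
    · rw [if_pos h0, if_pos (by simpa [PySem.Chars.lower] using h0)]
      dsimp only
      rw [hg 1, hg 2, hg 4]
      cases hf4 : PySem.Dict.get? translitRules (getNextLiteral s 4) with
      | some v =>
        rw [hdr 4]; exact ih (s.drop 4) (by simp; omega) _
      | none =>
        cases hf2 : PySem.Dict.get? translitRules (getNextLiteral s 2) with
        | some v =>
          rw [hdr 2]; exact ih (s.drop 2) (by simp; omega) _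
        | none =>
          rw [hdr 1]; exact ih (s.drop 1) (by simp; omega) _
    · rw [if_neg h0, if_neg (by simpa [PySem.Chars.lower] using h0)]

-- ===== VERDICT (by name: the statement is the Claim_ definition above) =====
theorem re_transliterate_spec : Claim_equal_re_transliterate := by
  intro text _
  unfold Spec_re_transliterate re_transliterate re_transliterate_alt
  congr 1
  rw [join_nil_flatten]
  have hfix : ∀ c ∈ PySem.Chars.lower text.toList, PySem.Chars.lowerChar c = c := by
    intro c hc
    simp [PySem.Chars.lower] at hc
    obtain ⟨x, _, rfl⟩ := hc
    exact lowerChar_idem x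
  rw [main_lemma (PySem.Chars.lower text.toList).length _ hfix 0 [] (by omega)]
  rw [List.drop_zero]
  rw [aLoop_lower text.toList.length text.toList le_rfl []]
  simp
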